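-- pv_equiv track=rewrite | github.com/Suraj757/SJ-Learning-Profile | Learning-Profile-Remix/utils/teacher_insights.py | generate_classroom_behavior_summary
-- ===== SOURCE A (Python) =====
-- from typing import Dict, List, Any
--
-- def generate_classroom_behavior_summary(scores: Dict[str, str], child_name: str) -> str:
--     """Generate a summary of expected classroom behaviors"""
--
--     strengths = [cat for cat, score in scores.items() if score == "High"]
--     growth_areas = [cat for cat, score in scores.items() if score == "Low"]
--
--     summary_parts = []
--
--     if "Communication" in strengths:
--         summary_parts.append(f"{child_name} is likely to be verbally expressive and enjoy sharing ideas in class discussions")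
--
--     if "Collaboration" in strengths:
--         summary_parts.append("thrives in group work and can help facilitate peer interactions")
--
--     if "Critical Thinking" in strengths:
--         summary_parts.append("asks thoughtful questions and enjoys problem-solving challenges")
--
--     if "Creative Innovation" in strengths:
--         summary_parts.append("approaches tasks with original thinking and creative solutions")
--
--     if "Confidence" in strengths:
--         summary_parts.append("shows willingness to take on challenges and share their work")
--
--     if "Content" in strengths:
--         summary_parts.append("demonstrates strong knowledge retention and academic curiosity")
--
--     # Add growth area considerations
--     if "Collaboration" in growth_areas:
--         summary_parts.append("may prefer individual work and need support in group settings")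
--
--     if "Confidence" in growth_areas:
--         summary_parts.append("may need encouragement and confidence-building opportunities")
--
--     if "Communication" in growth_areas:
--         summary_parts.append("may benefit from alternative ways to express ideas beyond verbal communication")
--
--     if len(summary_parts) == 0:
--         return f"{child_name} shows balanced development across learning areas and will benefit from varied instructional approaches."
--
--     if len(summary_parts) == 1:
--         return f"{child_name} {summary_parts[0]}."
--     else:
--         return f"{child_name} {', '.join(summary_parts[:-1])}, and {summary_parts[-1]}."
-- ===== SOURCE B (Python) =====
-- def generate_classroom_behavior_summary(scores, child_name):
--     """Single pass over the input building a 9-bit rule mask, then reconstruct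
--     the summary phrases from the mask bits (inverted traversal vs. A)."""
--     BITS = {
--         ("Communication", "High"): 0,
--         ("Collaboration", "High"): 1,
--         ("Critical Thinking", "High"): 2,
--         ("Creative Innovation", "High"): 3,
--         ("Confidence", "High"): 4,
--         ("Content", "High"): 5,
--         ("Collaboration", "Low"): 6,
--         ("Confidence", "Low"): 7,
--         ("Communication", "Low"): 8,
--     }
--     PHRASES = [
--         f"{child_name} is likely to be verbally expressive and enjoy sharing ideas in class discussions",
--         "thrives in group work and can help facilitate peer interactions",
--         "asks thoughtful questions and enjoys problem-solving challenges",
--         "approaches tasks with original thinking and creative solutions",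
--         "shows willingness to take on challenges and share their work",
--         "demonstrates strong knowledge retention and academic curiosity",
--         "may prefer individual work and need support in group settings",
--         "may need encouragement and confidence-building opportunities",
--         "may benefit from alternative ways to express ideas beyond verbal communication",
--     ]
--     mask = 0
--     for item in scores.items():
--         bit = BITS.get(item)
--         if bit is not None:
--             mask |= 1 << bit
--     parts = [phrase for i, phrase in enumerate(PHRASES) if (mask >> i) & 1]
--     if not parts:
--         return f"{child_name} shows balanced development across learning areas and will benefit from varied instructional approaches."
--     if len(parts) == 1:
--         return f"{child_name} {parts[0]}."
--     return f"{child_name} {', '.join(parts[:-1])}, and {parts[-1]}."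
-- ===== Notes on version B (the rewrite author's own statement) =====
-- stated objective: alternative
-- what changed: Inverts the traversal: instead of building strength/growth key lists and testing nine hard-coded memberships, B makes one pass over scores.items() accumulating a 9-bit rule mask via a (category,label)->bit dict, then reconstructs the phrase list from the mask bits in rule order.
import Mathlib
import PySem

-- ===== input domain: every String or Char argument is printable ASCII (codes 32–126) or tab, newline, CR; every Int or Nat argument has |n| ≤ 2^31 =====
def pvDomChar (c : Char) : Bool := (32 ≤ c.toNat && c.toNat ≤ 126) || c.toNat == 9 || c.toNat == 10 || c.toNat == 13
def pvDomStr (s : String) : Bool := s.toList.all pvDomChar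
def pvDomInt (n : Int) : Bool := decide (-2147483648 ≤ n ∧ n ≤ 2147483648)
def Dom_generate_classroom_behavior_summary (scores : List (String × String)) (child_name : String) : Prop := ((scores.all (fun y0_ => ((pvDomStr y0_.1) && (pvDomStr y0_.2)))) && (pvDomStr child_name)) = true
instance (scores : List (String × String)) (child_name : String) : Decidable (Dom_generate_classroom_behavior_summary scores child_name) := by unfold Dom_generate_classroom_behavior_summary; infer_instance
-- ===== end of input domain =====

-- B inverts the traversal: one pass over the input items accumulating a 9-bit rule
-- mask, then the phrases are reconstructed from the mask bits (objective: alternative).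

-- ===== PORT A =====
-- the Python dict argument: the association list is read as Python reads it, via Dict.ofList
def generate_classroom_behavior_summary (scores : List (String × String)) (child_name : String) : String :=
  let d := PySem.Dict.ofList scores
  let strengths := (d.items.filter (fun p => p.2 == "High")).map (fun p => p.1)
  let growth_areas := (d.items.filter (fun p => p.2 == "Low")).map (fun p => p.1)
  let summary_parts : List String := []
  let summary_parts := if "Communication" ∈ strengths then summary_parts ++ [child_name ++ " is likely to be verbally expressive and enjoy sharing ideas in class discussions"] else summary_parts
  let summary_parts := if "Collaboration" ∈ strengths then summary_parts ++ ["thrives in group work and can help facilitate peer interactions"] else summary_parts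
  let summary_parts := if "Critical Thinking" ∈ strengths then summary_parts ++ ["asks thoughtful questions and enjoys problem-solving challenges"] else summary_parts
  let summary_parts := if "Creative Innovation" ∈ strengths then summary_parts ++ ["approaches tasks with original thinking and creative solutions"] else summary_parts
  let summary_parts := if "Confidence" ∈ strengths then summary_parts ++ ["shows willingness to take on challenges and share their work"] else summary_parts
  let summary_parts := if "Content" ∈ strengths then summary_parts ++ ["demonstrates strong knowledge retention and academic curiosity"] else summary_parts
  let summary_parts := if "Collaboration" ∈ growth_areas then summary_parts ++ ["may prefer individual work and need support in group settings"] else summary_parts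
  let summary_parts := if "Confidence" ∈ growth_areas then summary_parts ++ ["may need encouragement and confidence-building opportunities"] else summary_parts
  let summary_parts := if "Communication" ∈ growth_areas then summary_parts ++ ["may benefit from alternative ways to express ideas beyond verbal communication"] else summary_parts
  if summary_parts.length == 0 then
    child_name ++ " shows balanced development across learning areas and will benefit from varied instructional approaches."
  else if summary_parts.length == 1 then
    child_name ++ " " ++ PySem.List.pyGetD summary_parts 0 "" ++ "."
  else
    child_name ++ " " ++ PySem.Str.join ", " (PySem.List.slice summary_parts none (some (-1))) ++ ", and " ++ PySem.List.pyGetD summary_parts (-1) "" ++ "."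

-- ===== PORT B =====
-- Source B's literal BITS dict: .get on a literal dict is its chained first-match test
def pvBitOf (p : String × String) : Option Nat :=
  if p = ("Communication", "High") then some 0
  else if p = ("Collaboration", "High") then some 1
  else if p = ("Critical Thinking", "High") then some 2
  else if p = ("Creative Innovation", "High") then some 3
  else if p = ("Confidence", "High") then some 4
  else if p = ("Content", "High") then some 5
  else if p = ("Collaboration", "Low") then some 6
  else if p = ("Confidence", "Low") then some 7
  else if p = ("Communication", "Low") then some 8
  else none

def pvPhrases (child_name : String) : List String :=
  [child_name ++ " is likely to be verbally expressive and enjoy sharing ideas in class discussions",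
   "thrives in group work and can help facilitate peer interactions",
   "asks thoughtful questions and enjoys problem-solving challenges",
   "approaches tasks with original thinking and creative solutions",
   "shows willingness to take on challenges and share their work",
   "demonstrates strong knowledge retention and academic curiosity",
   "may prefer individual work and need support in group settings",
   "may need encouragement and confidence-building opportunities",
   "may benefit from alternative ways to express ideas beyond verbal communication"]

def generate_classroom_behavior_summary_alt (scores : List (String × String)) (child_name : String) : String :=
  let d := PySem.Dict.ofList scores
  let mask : Nat := d.items.foldl (fun acc p =>
    match pvBitOf p with
    | some b => acc ||| (1 <<< b)
    | none => acc) 0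
  -- enumerate indices are ≥ 0 and mask ≥ 0, so Python's mask >> i & 1 is the Nat shift/and (e.1.toNat is exact here)
  let parts := (PySem.List.enumerate (pvPhrases child_name)).foldl
    (fun acc e => if (mask >>> e.1.toNat) &&& 1 == 1 then acc ++ [e.2] else acc) []
  if parts.length == 0 then
    child_name ++ " shows balanced development across learning areas and will benefit from varied instructional approaches."
  else if parts.length == 1 then
    child_name ++ " " ++ PySem.List.pyGetD parts 0 "" ++ "."
  else
    child_name ++ " " ++ PySem.Str.join ", " (PySem.List.slice parts none (some (-1))) ++ ", and " ++ PySem.List.pyGetD parts (-1) "" ++ "."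

-- ===== PRECONDITION & SPEC =====
def Spec_generate_classroom_behavior_summary (scores : List (String × String)) (child_name : String) (out : String) : Prop := out = generate_classroom_behavior_summary_alt scores child_name
instance (scores : List (String × String)) (child_name : String) (out : String) : Decidable (Spec_generate_classroom_behavior_summary scores child_name out) := by unfold Spec_generate_classroom_behavior_summary; infer_instance

-- ===== CLAIM (what is proved, stated in full; the proofs are below) =====
def Claim_equal_generate_classroom_behavior_summary : Prop := ∀ (scores : List (String × String)) (child_name : String), Dom_generate_classroom_behavior_summary scores child_name → Spec_generate_classroom_behavior_summary scores child_name (generate_classroom_behavior_summary scores child_name)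

-- ===== LEMMAS AND PROOFS =====

-- A's membership test in the filtered key comprehension ↔ pair membership.
lemma cond_iff (l : List (String × String)) (c v : String) :
    (c ∈ (l.filter (fun p => p.2 == v)).map (fun p => p.1)) ↔ (c, v) ∈ l := by
  constructor
  · intro hm
    obtain ⟨p, hp, hpc⟩ := List.mem_map.mp hm
    obtain ⟨hpl, hpv⟩ := List.mem_filter.mp hp
    have : p = (c, v) := Prod.ext hpc (by simpa using hpv)
    rwa [← this]
  · intro hcl
    exact List.mem_map.mpr ⟨(c, v), List.mem_filter.mpr ⟨hcl, by simp⟩, rfl⟩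

-- bit b of B's mask fold is set iff some item maps to bit b
lemma testBit_maskFold (l : List (String × String)) (acc : Nat) (b : Nat) :
    ((l.foldl (fun acc p => match pvBitOf p with
        | some k => acc ||| (1 <<< k)
        | none => acc) acc).testBit b) = true ↔
      acc.testBit b = true ∨ ∃ p ∈ l, pvBitOf p = some b := by
  induction l generalizing acc with
  | nil => simp
  | cons a t ih =>
    simp only [List.foldl_cons]
    cases hb : pvBitOf a with
    | none =>
      rw [ih]
      constructor
      · rintro (h | ⟨p, hp, he⟩)
        · exact Or.inl h
        · exact Or.inr ⟨p, List.mem_cons_of_mem _ hp, he⟩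
      · rintro (h | ⟨p, hp, he⟩)
        · exact Or.inl h
        · rcases List.mem_cons.mp hp with rfl | hp'
          · rw [hb] at he; exact absurd he (by simp)
          · exact Or.inr ⟨p, hp', he⟩
    | some k =>
      rw [ih]
      have hor : ((acc ||| (1 <<< k)).testBit b) = (acc.testBit b || decide (k = b)) := by
        simp [Nat.testBit_or, Nat.one_shiftLeft, Nat.testBit_two_pow]
      rw [hor]
      constructor
      · rintro (h | ⟨p, hp, he⟩)
        · rcases Bool.or_eq_true_iff.mp h with h' | h'
          · exact Or.inl h'
          · exact Or.inr ⟨a, List.mem_cons_self, by rw [hb, of_decide_eq_true h']⟩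
        · exact Or.inr ⟨p, List.mem_cons_of_mem _ hp, he⟩
      · rintro (h | ⟨p, hp, he⟩)
        · exact Or.inl (by simp [h])
        · rcases List.mem_cons.mp hp with rfl | hp'
          · rw [hb] at he
            exact Or.inl (by simp [Option.some_inj.mp he])
          · exact Or.inr ⟨p, hp', he⟩

-- with an injectivity description of pvBitOf at bit b, the existential collapses to a membership
lemma exists_bitOf (l : List (String × String)) (b : Nat) (k : String × String)
    (hk : ∀ p, pvBitOf p = some b ↔ p = k) :
    (∃ p ∈ l, pvBitOf p = some b) ↔ k ∈ l := by
  constructor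
  · rintro ⟨p, hp, he⟩; rwa [(hk p).1 he] at hp
  · intro h; exact ⟨k, h, (hk k).2 rfl⟩

-- the boolean test B's comprehension performs is Nat.testBit
lemma and_one_eq_testBit (m i : Nat) : ((m >>> i) &&& 1 == 1) = m.testBit i := by
  simp [Nat.testBit, Nat.and_one_is_mod, Nat.one_and_eq_mod_two]

-- bit b of B's mask (started from 0) ↔ the rule pair k is among the items
lemma mask_cond (l : List (String × String)) (b : Nat) (k : String × String)
    (hk : ∀ p, pvBitOf p = some b ↔ p = k) :
    (((l.foldl (fun acc p => match pvBitOf p with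
        | some k => acc ||| (1 <<< k)
        | none => acc) 0) >>> b) &&& 1 == 1) = true ↔ k ∈ l := by
  rw [and_one_eq_testBit, testBit_maskFold, exists_bitOf l b k hk]
  simp

lemma hbit0 : ∀ p, pvBitOf p = some 0 ↔ p = ("Communication", "High") := by
  intro p; unfold pvBitOf; split_ifs <;> simp_all
lemma hbit1 : ∀ p, pvBitOf p = some 1 ↔ p = ("Collaboration", "High") := by
  intro p; unfold pvBitOf; split_ifs <;> simp_all
lemma hbit2 : ∀ p, pvBitOf p = some 2 ↔ p = ("Critical Thinking", "High") := by
  intro p; unfold pvBitOf; split_ifs <;> simp_all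
lemma hbit3 : ∀ p, pvBitOf p = some 3 ↔ p = ("Creative Innovation", "High") := by
  intro p; unfold pvBitOf; split_ifs <;> simp_all
lemma hbit4 : ∀ p, pvBitOf p = some 4 ↔ p = ("Confidence", "High") := by
  intro p; unfold pvBitOf; split_ifs <;> simp_all
lemma hbit5 : ∀ p, pvBitOf p = some 5 ↔ p = ("Content", "High") := by
  intro p; unfold pvBitOf; split_ifs <;> simp_all
lemma hbit6 : ∀ p, pvBitOf p = some 6 ↔ p = ("Collaboration", "Low") := by
  intro p; unfold pvBitOf; split_ifs <;> simp_all
lemma hbit7 : ∀ p, pvBitOf p = some 7 ↔ p = ("Confidence", "Low") := by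
  intro p; unfold pvBitOf; split_ifs <;> simp_all
lemma hbit8 : ∀ p, pvBitOf p = some 8 ↔ p = ("Communication", "Low") := by
  intro p; unfold pvBitOf; split_ifs <;> simp_all


-- proof-only helpers: the shared formatting, and each port's parts list as a standalone term
def pvRender (child_name : String) (parts : List String) : String :=
  if parts.length == 0 then
    child_name ++ " shows balanced development across learning areas and will benefit from varied instructional approaches."
  else if parts.length == 1 then
    child_name ++ " " ++ PySem.List.pyGetD parts 0 "" ++ "."
  else
    child_name ++ " " ++ PySem.Str.join ", " (PySem.List.slice parts none (some (-1))) ++ ", and " ++ PySem.List.pyGetD parts (-1) "" ++ "."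

def pvPartsA (scores : List (String × String)) (child_name : String) : List String :=
  let d := PySem.Dict.ofList scores
  let strengths := (d.items.filter (fun p => p.2 == "High")).map (fun p => p.1)
  let growth_areas := (d.items.filter (fun p => p.2 == "Low")).map (fun p => p.1)
  let summary_parts : List String := []
  let summary_parts := if "Communication" ∈ strengths then summary_parts ++ [child_name ++ " is likely to be verbally expressive and enjoy sharing ideas in class discussions"] else summary_parts
  let summary_parts := if "Collaboration" ∈ strengths then summary_parts ++ ["thrives in group work and can help facilitate peer interactions"] else summary_parts
  let summary_parts := if "Critical Thinking" ∈ strengths then summary_parts ++ ["asks thoughtful questions and enjoys problem-solving challenges"] else summary_parts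
  let summary_parts := if "Creative Innovation" ∈ strengths then summary_parts ++ ["approaches tasks with original thinking and creative solutions"] else summary_parts
  let summary_parts := if "Confidence" ∈ strengths then summary_parts ++ ["shows willingness to take on challenges and share their work"] else summary_parts
  let summary_parts := if "Content" ∈ strengths then summary_parts ++ ["demonstrates strong knowledge retention and academic curiosity"] else summary_parts
  let summary_parts := if "Collaboration" ∈ growth_areas then summary_parts ++ ["may prefer individual work and need support in group settings"] else summary_parts
  let summary_parts := if "Confidence" ∈ growth_areas then summary_parts ++ ["may need encouragement and confidence-building opportunities"] else summary_parts
  let summary_parts := if "Communication" ∈ growth_areas then summary_parts ++ ["may benefit from alternative ways to express ideas beyond verbal communication"] else summary_parts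
  summary_parts

def pvPartsB (scores : List (String × String)) (child_name : String) : List String :=
  let d := PySem.Dict.ofList scores
  let mask : Nat := d.items.foldl (fun acc p =>
    match pvBitOf p with
    | some b => acc ||| (1 <<< b)
    | none => acc) 0
  (PySem.List.enumerate (pvPhrases child_name)).foldl
    (fun acc e => if (mask >>> e.1.toNat) &&& 1 == 1 then acc ++ [e.2] else acc) []

lemma A_render (scores : List (String × String)) (child_name : String) :
    generate_classroom_behavior_summary scores child_name = pvRender child_name (pvPartsA scores child_name) := rfl

lemma B_render (scores : List (String × String)) (child_name : String) :
    generate_classroom_behavior_summary_alt scores child_name = pvRender child_name (pvPartsB scores child_name) := rfl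

lemma parts_eq (scores : List (String × String)) (child_name : String) :
    pvPartsA scores child_name = pvPartsB scores child_name := by
  unfold pvPartsA pvPartsB
  simp only [pvPhrases, PySem.List.enumerate, List.foldl_cons, List.foldl_nil,
    Int.reduceAdd, Int.reduceToNat, List.nil_append, cond_iff,
    mask_cond _ 0 ("Communication", "High") hbit0,
    mask_cond _ 1 ("Collaboration", "High") hbit1,
    mask_cond _ 2 ("Critical Thinking", "High") hbit2,
    mask_cond _ 3 ("Creative Innovation", "High") hbit3,
    mask_cond _ 4 ("Confidence", "High") hbit4,
    mask_cond _ 5 ("Content", "High") hbit5,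
    mask_cond _ 6 ("Collaboration", "Low") hbit6,
    mask_cond _ 7 ("Confidence", "Low") hbit7,
    mask_cond _ 8 ("Communication", "Low") hbit8]

-- ===== VERDICT (by name: the statement is the Claim_ definition above) =====
theorem generate_classroom_behavior_summary_spec : Claim_equal_generate_classroom_behavior_summary := by
  intro scores child_name _
  unfold Spec_generate_classroom_behavior_summary
  rw [A_render, B_render, parts_eq]
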